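-- pv_equiv track=rewrite | github.com/rushiruhua17/Xliff-AI-Translation | core/token_safe_translation.py | strip_known_tokens
-- ===== SOURCE A (Python) =====
-- from typing import Dict, List, Optional, Set, Tuple
--
-- def strip_known_tokens(text: str, tags_map: Dict[str, str]) -> str:
--     known: Set[str] = set((tags_map or {}).keys())
--     if not known:
--         return text or ""
--
--     s = text or ""
--     out: List[str] = []
--     i = 0
--     n = len(s)
--     while i < n:
--         if s[i] != "{":
--             out.append(s[i])
--             i += 1
--             continue
--
--         j = i + 1
--         if j < n and s[j].isdigit():
--             while j < n and s[j].isdigit():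
--                 j += 1
--             if j < n and s[j] == "}":
--                 key = s[i + 1 : j]
--                 if key in known:
--                     i = j + 1
--                     continue
--
--         out.append(s[i])
--         i += 1
--
--     return "".join(out)
-- ===== SOURCE B (Python) =====
-- import re
--
-- _TOKEN = re.compile(r"\{(\d+)\}")
--
-- def strip_known_tokens(text, tags_map):
--     known = set((tags_map or {}).keys())
--     if not known:
--         return text or ""
--     s = text or ""
--     return _TOKEN.sub(lambda m: "" if m.group(1) in known else m.group(0), s)
-- ===== Notes on version B (the rewrite author's own statement) =====
-- stated objective: idiomatic
-- what changed: Replaced the hand-written index/while character scanner with a single compiled regex re.sub of \{(\d+)\}, whose replacement callback drops known keys and keeps unknown matches.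
import Mathlib
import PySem

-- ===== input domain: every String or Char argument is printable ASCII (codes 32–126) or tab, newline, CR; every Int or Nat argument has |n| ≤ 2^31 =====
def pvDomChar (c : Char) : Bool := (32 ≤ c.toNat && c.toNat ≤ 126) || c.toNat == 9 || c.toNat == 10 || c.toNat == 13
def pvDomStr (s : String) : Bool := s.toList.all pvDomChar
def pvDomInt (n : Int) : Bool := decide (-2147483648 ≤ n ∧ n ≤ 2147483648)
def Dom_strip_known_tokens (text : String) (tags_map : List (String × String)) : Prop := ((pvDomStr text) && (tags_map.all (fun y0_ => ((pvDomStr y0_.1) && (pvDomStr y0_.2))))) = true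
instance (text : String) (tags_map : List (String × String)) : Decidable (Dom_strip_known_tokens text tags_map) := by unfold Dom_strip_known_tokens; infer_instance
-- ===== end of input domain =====

-- B replaces A's hand-written index/while scanner by re.sub on the pattern \{(\d+)\}
-- (leftmost non-overlapping matches, spliced with prefix text); same return value.

-- ===== PORT A =====
-- A's while loop over index i, transliterated as structural recursion on the character
-- list: the inner 'while j < n and s[j].isdigit()' is the takeWhile/dropWhile split of
-- the suffix after '{' (Char.isDigit is exact for str.isdigit on the ASCII domain).
def stripLoopA (known : PySem.Set String) : List Char → List Char
  | [] => []
  | c :: rest =>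
    if c ≠ '{' then c :: stripLoopA known rest
    else
      match h : rest.dropWhile Char.isDigit with
      | '}' :: tail =>
        if rest.takeWhile Char.isDigit ≠ [] ∧
           PySem.Set.contains known (String.mk (rest.takeWhile Char.isDigit)) then
          stripLoopA known tail
        else c :: stripLoopA known rest
      | _ => c :: stripLoopA known rest
  termination_by s => s.length
  decreasing_by
    all_goals first
    | (simp; done)
    | (have hlen := (List.dropWhile_sublist (p := Char.isDigit) (l := rest)).length_le
       rw [h] at hlen; simp at hlen ⊢; omega)

def strip_known_tokens (text : String) (tags_map : List (String × String)) : String :=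
  let known : PySem.Set String := PySem.Set.ofList (tags_map.map Prod.fst)
  if known.isEmpty then text
  else String.mk (stripLoopA known text.toList)

-- ===== PORT B =====
-- Hand port of re.sub(r"\{(\d+)\}", repl, s): findTok finds the leftmost match,
-- returning (unmatched prefix, captured digits, suffix after the match); subB splices
-- prefix ++ replacement and continues AFTER the match (non-overlapping), exactly the
-- re engine's behaviour for this pattern (\d+ greedy = the maximal digit run, since a
-- shorter run is followed by a digit, never '}').
def findTok : List Char → Option (List Char × List Char × List Char)
  | [] => none
  | c :: rest =>
    if c = '{' then
      match rest.dropWhile Char.isDigit with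
      | '}' :: tail =>
        if rest.takeWhile Char.isDigit ≠ [] then
          some ([], rest.takeWhile Char.isDigit, tail)
        else (findTok rest).map (fun p => (c :: p.1, p.2.1, p.2.2))
      | _ => (findTok rest).map (fun p => (c :: p.1, p.2.1, p.2.2))
    else (findTok rest).map (fun p => (c :: p.1, p.2.1, p.2.2))

theorem findTok_length : ∀ (s pre ds suf : List Char),
    findTok s = some (pre, ds, suf) → suf.length < s.length := by
  intro s
  induction s with
  | nil => intro pre ds suf h; simp [findTok] at h
  | cons c rest ih =>
    intro pre ds suf h
    rw [findTok] at h
    split at h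
    · split at h
      · split at h
        · rename_i tail heq _
          simp only [Option.some.injEq, Prod.mk.injEq] at h
          obtain ⟨-, -, rfl⟩ := h
          have hlen := (List.dropWhile_sublist (p := Char.isDigit) (l := rest)).length_le
          rw [heq] at hlen; simp at hlen ⊢; omega
        · rcases Option.map_eq_some_iff.mp h with ⟨⟨p1, p2, p3⟩, hf, he⟩
          simp only [Option.some.injEq, Prod.mk.injEq] at he
          obtain ⟨-, -, rfl⟩ := he
          have := ih _ _ _ hf; simp; omega
      · rcases Option.map_eq_some_iff.mp h with ⟨⟨p1, p2, p3⟩, hf, he⟩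
        simp only [Option.some.injEq, Prod.mk.injEq] at he
        obtain ⟨-, -, rfl⟩ := he
        have := ih _ _ _ hf; simp; omega
    · rcases Option.map_eq_some_iff.mp h with ⟨⟨p1, p2, p3⟩, hf, he⟩
      simp only [Option.some.injEq, Prod.mk.injEq] at he
      obtain ⟨-, -, rfl⟩ := he
      have := ih _ _ _ hf; simp; omega

def subB (known : PySem.Set String) (s : List Char) : List Char :=
  match h : findTok s with
  | none => s
  | some (pre, ds, suf) =>
    pre ++ (if PySem.Set.contains known (String.mk ds) then [] else '{' :: ds ++ ['}'])
        ++ subB known suf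
  termination_by s.length
  decreasing_by exact findTok_length s pre ds suf h

def strip_known_tokens_alt (text : String) (tags_map : List (String × String)) : String :=
  let known : PySem.Set String := PySem.Set.ofList (tags_map.map Prod.fst)
  if known.isEmpty then text
  else String.mk (subB known text.toList)

-- ===== PRECONDITION & SPEC =====
def Spec_strip_known_tokens (text : String) (tags_map : List (String × String)) (out : String) : Prop := out = strip_known_tokens_alt text tags_map
instance (text : String) (tags_map : List (String × String)) (out : String) : Decidable (Spec_strip_known_tokens text tags_map out) := by unfold Spec_strip_known_tokens; infer_instance

-- ===== CLAIM (what is proved, stated in full; the proofs are below) =====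
def Claim_equal_strip_known_tokens : Prop := ∀ (text : String) (tags_map : List (String × String)), Dom_strip_known_tokens text tags_map → Spec_strip_known_tokens text tags_map (strip_known_tokens text tags_map)

-- ===== LEMMAS AND PROOFS =====

-- When no match starts at the head, findTok just prepends the head character.
theorem findTok_cons_nomatch (c : Char) (rest : List Char)
    (h : c = '{' → (rest.takeWhile Char.isDigit = [] ∨
                    ∀ tail, rest.dropWhile Char.isDigit ≠ '}' :: tail)) :
    findTok (c :: rest) = (findTok rest).map (fun p => (c :: p.1, p.2.1, p.2.2)) := by
  by_cases hc : c = '{'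
  · rw [findTok, if_pos hc]
    split
    · rename_i tail heq
      rcases h hc with hds | hnm
      · rw [if_neg (by simp [hds])]
      · exact absurd heq (hnm tail)
    · rfl
  · rw [findTok, if_neg hc]

theorem subB_of_none (known : PySem.Set String) (s : List Char)
    (hf : findTok s = none) : subB known s = s := by
  rw [subB]
  split
  · rfl
  · rename_i pre ds suf heq; rw [hf] at heq; cases heq

theorem subB_of_some (known : PySem.Set String) (s pre ds suf : List Char)
    (hf : findTok s = some (pre, ds, suf)) :
    subB known s = pre ++ (if PySem.Set.contains known (String.mk ds) then []
                           else '{' :: ds ++ ['}']) ++ subB known suf := by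
  rw [subB]
  split
  · rename_i heq; rw [hf] at heq; cases heq
  · rename_i p d f heq
    rw [hf] at heq
    simp only [Option.some.injEq, Prod.mk.injEq] at heq
    obtain ⟨rfl, rfl, rfl⟩ := heq
    rfl

theorem subB_cons_nomatch (known : PySem.Set String) (c : Char) (rest : List Char)
    (h : c = '{' → (rest.takeWhile Char.isDigit = [] ∨
                    ∀ tail, rest.dropWhile Char.isDigit ≠ '}' :: tail)) :
    subB known (c :: rest) = c :: subB known rest := by
  have hft := findTok_cons_nomatch c rest h
  match hres : findTok rest with
  | none =>
    rw [hres] at hft; simp only [Option.map_none] at hft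
    rw [subB_of_none known _ hft, subB_of_none known _ hres]
  | some (pre, ds, suf) =>
    rw [hres] at hft; simp only [Option.map_some] at hft
    rw [subB_of_some known _ _ _ _ hft, subB_of_some known _ _ _ _ hres]
    simp

-- A match at the head: findTok returns it immediately.
theorem findTok_cons_match (rest tail : List Char)
    (hds : rest.takeWhile Char.isDigit ≠ [])
    (hdrop : rest.dropWhile Char.isDigit = '}' :: tail) :
    findTok ('{' :: rest) = some ([], rest.takeWhile Char.isDigit, tail) := by
  rw [findTok, if_pos rfl]
  simp [hdrop, hds]

theorem subB_cons_match (known : PySem.Set String) (rest tail : List Char)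
    (hds : rest.takeWhile Char.isDigit ≠ [])
    (hdrop : rest.dropWhile Char.isDigit = '}' :: tail) :
    subB known ('{' :: rest) =
      (if PySem.Set.contains known (String.mk (rest.takeWhile Char.isDigit)) then []
       else '{' :: rest.takeWhile Char.isDigit ++ ['}']) ++ subB known tail := by
  rw [subB_of_some known _ _ _ _ (findTok_cons_match rest tail hds hdrop)]
  simp

-- Unfolding lemmas for A's loop at a '{' head.
theorem stripLoopA_brace (known : PySem.Set String) (rest tail : List Char)
    (hdrop : rest.dropWhile Char.isDigit = '}' :: tail) :
    stripLoopA known ('{' :: rest) =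
      if rest.takeWhile Char.isDigit ≠ [] ∧
         PySem.Set.contains known (String.mk (rest.takeWhile Char.isDigit)) then
        stripLoopA known tail
      else '{' :: stripLoopA known rest := by
  rw [stripLoopA, if_neg (by simp)]
  split
  · rename_i t heq
    rw [hdrop] at heq
    injection heq with _ h2
    subst h2
    rfl
  · rename_i hne
    exact absurd hdrop (hne tail)

theorem stripLoopA_brace_nomatch (known : PySem.Set String) (rest : List Char)
    (hnm : ∀ tail, rest.dropWhile Char.isDigit ≠ '}' :: tail) :
    stripLoopA known ('{' :: rest) = '{' :: stripLoopA known rest := by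
  rw [stripLoopA, if_neg (by simp)]
  split
  · rename_i t heq
    exact absurd heq (hnm t)
  · rfl

-- stripLoopA passes over a block of digit characters (they are never '{').
theorem stripLoopA_digits (known : PySem.Set String) (ds r : List Char)
    (h : ∀ c ∈ ds, c.isDigit = true) :
    stripLoopA known (ds ++ r) = ds ++ stripLoopA known r := by
  induction ds with
  | nil => simp
  | cons d ds ih =>
    have hd : d.isDigit = true := h d (by simp)
    have hne : d ≠ '{' := by
      intro hcontra; subst hcontra; simp [Char.isDigit] at hd
    rw [List.cons_append, stripLoopA, if_pos hne,
        ih (fun c hc => h c (by simp [hc]))]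
    simp

-- Core equivalence of the two scanners, by strong induction on the length.
theorem stripA_eq_subB (known : PySem.Set String) (s : List Char) :
    stripLoopA known s = subB known s := by
  induction hn : s.length using Nat.strong_induction_on generalizing s with
  | _ n ih =>
  subst hn
  match s with
  | [] => rw [stripLoopA, subB]; rfl
  | c :: rest =>
    by_cases hc : c = '{'
    · subst hc
      by_cases hm : ∃ tail, rest.dropWhile Char.isDigit = '}' :: tail
      · obtain ⟨tail, hdrop⟩ := hm
        have htaillen : tail.length < ('{' :: rest).length := by
          have := (List.dropWhile_sublist (p := Char.isDigit) (l := rest)).length_le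
          rw [hdrop] at this; simp at this ⊢; omega
        rw [stripLoopA_brace known rest tail hdrop]
        by_cases hds : rest.takeWhile Char.isDigit = []
        · -- "{}" at the head: no token; both emit '{' and continue with rest
          rw [if_neg (by simp [hds]),
              subB_cons_nomatch known '{' rest (fun _ => Or.inl hds),
              ih rest.length (by simp) rest rfl]
        · rw [subB_cons_match known rest tail hds hdrop]
          by_cases hk : PySem.Set.contains known (String.mk (rest.takeWhile Char.isDigit))
          · -- known key: both skip the token
            rw [if_pos ⟨hds, hk⟩, if_pos hk, List.nil_append,
                ih tail.length htaillen tail rfl]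
          · -- unknown key: A emits '{' and rescans; B splices the whole match
            rw [if_neg (fun hcond => hk hcond.2), if_neg hk]
            have hlenr : rest = rest.takeWhile Char.isDigit ++ '}' :: tail := by
              conv_lhs => rw [← List.takeWhile_append_dropWhile (p := Char.isDigit) (l := rest)]
              rw [hdrop]
            have hrest : stripLoopA known rest
                = rest.takeWhile Char.isDigit ++ '}' :: stripLoopA known tail := by
              conv_lhs => rw [hlenr]
              rw [stripLoopA_digits known _ _ (fun c hc => List.mem_takeWhile_imp hc)]
              congr 1
              rw [stripLoopA, if_pos (by decide : ('}' : Char) ≠ '{')]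
            rw [hrest, ih tail.length htaillen tail rfl]
            simp
      · have hnm : ∀ t, rest.dropWhile Char.isDigit ≠ '}' :: t :=
          fun t h => hm ⟨t, h⟩
        rw [stripLoopA_brace_nomatch known rest hnm,
            subB_cons_nomatch known '{' rest (fun _ => Or.inr hnm),
            ih rest.length (by simp) rest rfl]
    · rw [stripLoopA, if_pos hc,
          subB_cons_nomatch known c rest (fun h => absurd h hc),
          ih rest.length (by simp) rest rfl]

-- ===== VERDICT (by name: the statement is the Claim_ definition above) =====
theorem strip_known_tokens_spec : Claim_equal_strip_known_tokens := by
  intro text tags_map _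
  unfold Spec_strip_known_tokens strip_known_tokens strip_known_tokens_alt
  simp only [stripA_eq_subB]
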